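-- pv_equiv track=rewrite | github.com/i960107/algorithm | programmers/재귀_124나라의숫자.py | solution_124_country
-- ===== SOURCE A (Python) =====
-- def solution_124_country(n: int) -> int:
--     answer = ''
--     i = 0
--     length = 3 ** i
--     border = 0
--     numbers = [1, 2, 4]
--
--     while True:
--         if border + 3 ** (i + 1) >= n:
--             break
--         i += 1
--         length += 1
--         border += 3 ** i
--
--     while length > 0:
--         idx = ((n - border) // 3 ** (length - 1)) % 3
--         if length != 1:
--             answer += str(numbers[idx])
--         else:
--             answer += str(numbers[idx - 1])
--         length -= 1
--
--     return int(answer)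
-- ===== SOURCE B (Python) =====
-- def solution_124_country(n: int) -> int:
--     # Find the digit count k: smallest k >= 1 with (3**(k+1) - 3) // 2 >= n.
--     k, p = 1, 9  # p = 3 ** (k + 1)
--     while (p - 3) // 2 < n:
--         k += 1
--         p *= 3
--     m = n - (p // 3 - 3) // 2
--     # Peel the k base-3 digits of m least-significant first; the lowest digit
--     # maps through '412' (0->4, 1->1, 2->2), the rest through '124'.
--     out = []
--     table = '412'
--     for _ in range(k):
--         out.append(table[m % 3])
--         m //= 3
--         table = '124'
--     return int(''.join(reversed(out)))
-- ===== Notes on version B (the rewrite author's own statement) =====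
-- stated objective: simpler
-- what changed: B replaces A's front-to-back digit extraction (recomputing a power 3**(length-1) and an integer division per digit) with a single least-significant-first digit-peeling loop (m%3, m//=3) over two lookup tables, assembling the string back-to-front; the digit-count search keeps one running power instead of A's three counters.
import Mathlib
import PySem

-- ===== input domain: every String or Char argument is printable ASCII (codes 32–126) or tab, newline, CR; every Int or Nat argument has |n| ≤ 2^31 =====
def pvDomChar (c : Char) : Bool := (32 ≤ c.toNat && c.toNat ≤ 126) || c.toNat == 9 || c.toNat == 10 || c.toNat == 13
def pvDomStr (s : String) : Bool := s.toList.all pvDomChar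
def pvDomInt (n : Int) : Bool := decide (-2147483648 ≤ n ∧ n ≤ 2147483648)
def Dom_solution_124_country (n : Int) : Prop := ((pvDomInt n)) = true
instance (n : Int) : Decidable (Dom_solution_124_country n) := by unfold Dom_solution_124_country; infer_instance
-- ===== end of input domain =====

-- B recomputes A's exact mapping by one least-significant-first digit-peeling loop instead of
-- A's per-digit power/division pass (objective: simpler).

-- ===== PORT A =====
-- first while-loop of A: state (i, length, border); i and length only ever hold nonnegative
-- Python ints, so they are carried as Nat.  The fuel argument only makes the loop total:
-- each iteration shrinks (n - border).toNat by at least 3, so with fuel > (n - border).toNat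
-- the 0-fuel branch is never reached (pvLoops1_corr below is proved by induction on it)
def pvLoopA1 (n : Int) (fuel : Nat) (i length : Nat) (border : Int) : Nat × Int :=
  match fuel with
  | 0 => (length, border)
  | fuel + 1 =>
    if border + 3 ^ (i + 1) ≥ n then (length, border)
    else pvLoopA1 n fuel (i + 1) (length + 1) (border + 3 ^ (i + 1))

-- second while-loop of A: answer += str(numbers[idx]) / str(numbers[idx-1]);
-- numbers[...] via pyGet? (negative index wraps); .getD 0 is unreachable since idx ∈ [0,3)
def pvLoopA2 (n border : Int) : Nat → String → String
  | 0, answer => answer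
  | (l + 1), answer =>
    let idx := PySem.Int.mod (PySem.Int.floordiv (n - border) (3 ^ l)) 3
    if l + 1 ≠ 1 then
      pvLoopA2 n border l (answer ++ PySem.Int.toStr ((PySem.List.pyGet? ([1,2,4] : List Int) idx).getD 0))
    else
      pvLoopA2 n border l (answer ++ PySem.Int.toStr ((PySem.List.pyGet? ([1,2,4] : List Int) (idx - 1)).getD 0))

def solution_124_country (n : Int) : Int :=
  let r := pvLoopA1 n (n.toNat + 1) 0 1 0
  let answer := pvLoopA2 n r.2 r.1 ""
  -- int(answer); never a ValueError: answer is a nonempty digit string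
  (PySem.Int.ofStr? answer).getD 0

-- ===== PORT B =====
-- B's first loop; the fuel argument only makes the loop total (each iteration shrinks
-- (n - (p-3)//2).toNat by at least 3, so the 0-fuel branch is never reached)
def pvLoopB1 (n : Int) (fuel : Nat) (k : Nat) (p : Int) : Nat × Int :=
  match fuel with
  | 0 => (k, p)
  | fuel + 1 =>
    if PySem.Int.floordiv (p - 3) 2 < n then pvLoopB1 n fuel (k + 1) (p * 3)
    else (k, p)

-- B's digit loop: for _ in range(k): out.append(table[m % 3]); m //= 3; table = '124'
def pvLoopB2 (m : Int) (k : Nat) (table : List Char) : List Char :=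
  match k with
  | 0 => []
  | k + 1 =>
    (PySem.List.pyGet? table (PySem.Int.mod m 3)).getD '0'
      :: pvLoopB2 (PySem.Int.floordiv m 3) k ['1','2','4']

def solution_124_country_alt (n : Int) : Int :=
  let r := pvLoopB1 n (n.toNat + 1) 1 9
  let m := n - PySem.Int.floordiv (PySem.Int.floordiv r.2 3 - 3) 2
  let out := pvLoopB2 m r.1 ['4','1','2']
  (PySem.Int.ofStr? (String.ofList out.reverse)).getD 0

-- ===== PRECONDITION & SPEC =====
def Spec_solution_124_country (n : Int) (out : Int) : Prop := out = solution_124_country_alt n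
instance (n : Int) (out : Int) : Decidable (Spec_solution_124_country n out) := by unfold Spec_solution_124_country; infer_instance

-- ===== CLAIM (what is proved, stated in full; the proofs are below) =====
def Claim_equal_solution_124_country : Prop := ∀ (n : Int), Dom_solution_124_country n → Spec_solution_124_country n (solution_124_country n)

-- ===== LEMMAS AND PROOFS =====

-- the digit A writes for weight 3^l
def pvDigit (m : Int) (l : Nat) : Int := PySem.Int.mod (PySem.Int.floordiv m (3 ^ l)) 3

-- A's character for a non-last digit / the last digit, as a char list
def pvCN (d : Int) : List Char := (PySem.Int.toStr ((PySem.List.pyGet? ([1,2,4] : List Int) d).getD 0)).toList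
def pvCW (d : Int) : List Char := (PySem.Int.toStr ((PySem.List.pyGet? ([1,2,4] : List Int) (d - 1)).getD 0)).toList

-- the char list A's second loop appends, top digit first, wrap rule on the last digit
def pvCharsW (m : Int) : Nat → List Char
  | 0 => []
  | 1 => pvCW (pvDigit m 0)
  | (l + 2) => pvCN (pvDigit m (l + 1)) ++ pvCharsW m (l + 1)

-- same but with the normal rule throughout (what B's '124' table produces)
def pvCharsN (m : Int) : Nat → List Char
  | 0 => []
  | (l + 1) => pvCN (pvDigit m l) ++ pvCharsN m l

lemma pvDigit_succ (m : Int) (l : Nat) :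
    pvDigit m (l + 1) = pvDigit (PySem.Int.floordiv m 3) l := by
  unfold pvDigit
  have h1 : (0:Int) < 3 ^ (l + 1) := by positivity
  have h2 : (0:Int) < 3 ^ l := by positivity
  rw [PySem.Int.floordiv_eq_ediv_of_pos h1, PySem.Int.floordiv_eq_ediv_of_pos h2,
    PySem.Int.floordiv_eq_ediv_of_pos (by omega : (0:Int) < 3),
    Int.ediv_ediv_of_nonneg (by omega : (0:Int) ≤ 3)]
  congr 2
  ring

lemma pvDigit_zero (m : Int) : pvDigit m 0 = PySem.Int.mod m 3 := by
  unfold pvDigit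
  rw [pow_zero, PySem.Int.floordiv_eq_ediv_of_pos (by omega : (0:Int) < 1), Int.ediv_one]

lemma pvCharsN_split (l : Nat) (m : Int) :
    pvCharsN m (l + 1) = pvCharsN (PySem.Int.floordiv m 3) l ++ pvCN (PySem.Int.mod m 3) := by
  induction l generalizing m with
  | zero => simp [pvCharsN, pvDigit_zero]
  | succ l ih =>
    show pvCN (pvDigit m (l + 1)) ++ pvCharsN m (l + 1) = _
    rw [pvDigit_succ, ih]
    show _ = (pvCN (pvDigit (PySem.Int.floordiv m 3) l) ++ pvCharsN (PySem.Int.floordiv m 3) l) ++ _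
    simp [List.append_assoc]

lemma pvCharsW_split (l : Nat) (m : Int) :
    pvCharsW m (l + 1) = pvCharsN (PySem.Int.floordiv m 3) l ++ pvCW (PySem.Int.mod m 3) := by
  cases l with
  | zero => simp [pvCharsW, pvCharsN, pvDigit_zero]
  | succ l =>
    show pvCN (pvDigit m (l + 1)) ++ pvCharsW m (l + 1) = _
    rw [pvDigit_succ, pvCharsW_split l m]
    show _ = (pvCN (pvDigit (PySem.Int.floordiv m 3) l) ++ pvCharsN (PySem.Int.floordiv m 3) l) ++ _
    simp [List.append_assoc]

lemma pvLoopA2_chars (l : Nat) : ∀ (n border : Int) (acc : String),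
    (pvLoopA2 n border l acc).toList = acc.toList ++ pvCharsW (n - border) l := by
  induction l with
  | zero => intro n border acc; simp [pvLoopA2, pvCharsW]
  | succ l ih =>
    intro n border acc
    rw [pvLoopA2]
    cases l with
    | zero =>
      rw [if_neg (by omega : ¬(0 + 1 ≠ 1))]
      rw [ih]
      show _ = acc.toList ++ pvCW (pvDigit (n - border) 0)
      simp [pvCW, pvDigit, pvCharsW, String.toList_append]
    | succ s =>
      rw [if_pos (by omega : s + 1 + 1 ≠ 1)]
      rw [ih]
      show _ = acc.toList ++ (pvCN (pvDigit (n - border) (s + 1)) ++ pvCharsW (n - border) (s + 1))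
      simp [pvCN, pvDigit, String.toList_append, List.append_assoc]

lemma pvMod3_cases (m : Int) :
    PySem.Int.mod m 3 = 0 ∨ PySem.Int.mod m 3 = 1 ∨ PySem.Int.mod m 3 = 2 := by
  have h1 := PySem.Int.mod_nonneg m (by omega : (0:Int) < 3)
  have h2 := PySem.Int.mod_lt m (by omega : (0:Int) < 3)
  omega

lemma pvLoopB2_norm (l : Nat) : ∀ (m : Int),
    (pvLoopB2 m l ['1','2','4']).reverse = pvCharsN m l := by
  induction l with
  | zero => intro m; simp [pvLoopB2, pvCharsN]
  | succ l ih =>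
    intro m
    rw [pvLoopB2, List.reverse_cons, ih, pvCharsN_split]
    congr 1
    rcases pvMod3_cases m with h | h | h <;> rw [h] <;> decide

lemma pvLoopB2_wrap (l : Nat) (m : Int) :
    (pvLoopB2 m (l + 1) ['4','1','2']).reverse = pvCharsW m (l + 1) := by
  rw [pvLoopB2, List.reverse_cons, pvLoopB2_norm, pvCharsW_split]
  congr 1
  rcases pvMod3_cases m with h | h | h <;> rw [h] <;> decide

-- correspondence of the two digit-count loops, by induction on the shared fuel
lemma pvLoops1_corr (fuel : Nat) : ∀ (n : Int) (i : Nat) (border p : Int)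
    (_hb : 2 * border = 3 ^ (i + 1) - 3) (_hpv : p = 3 ^ (i + 2))
    (_hf : (n - border).toNat < fuel),
    ∃ (k : Nat) (b2 : Int), 1 ≤ k ∧ pvLoopA1 n fuel i (i + 1) border = (k, b2) ∧
      pvLoopB1 n fuel (i + 1) p = (k, 3 ^ (k + 1)) ∧ 2 * b2 = 3 ^ k - 3 := by
  induction fuel with
  | zero => intro n i border p hb hpv hf; omega
  | succ fuel ih =>
    intro n i border p hb hpv hf
    have hA3 : (3:Int) ^ (i + 2) = 3 * 3 ^ (i + 1) := by ring
    have hpow : (0:Int) < 3 ^ (i + 1) := by positivity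
    have hkey : p - 3 = 2 * (border + 3 ^ (i + 1)) := by omega
    have hfd : PySem.Int.floordiv (p - 3) 2 = border + 3 ^ (i + 1) := by
      rw [hkey, PySem.Int.floordiv_eq_ediv_of_pos (by omega : (0:Int) < 2),
        Int.mul_ediv_cancel_left _ (by norm_num : (2:Int) ≠ 0)]
    by_cases hstop : border + 3 ^ (i + 1) ≥ n
    · refine ⟨i + 1, border, by omega, ?_, ?_, hb⟩
      · rw [pvLoopA1, if_pos hstop]
      · rw [pvLoopB1, if_neg (by rw [hfd]; omega), hpv]
    · have hA4 : (3:Int) ^ (i + 1 + 2) = 3 * 3 ^ (i + 2) := by ring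
      obtain ⟨k, b2, hk, h1, h2, h3⟩ := ih n (i + 1) (border + 3 ^ (i + 1)) (p * 3)
        (by omega) (by omega) (by omega)
      refine ⟨k, b2, hk, ?_, ?_, h3⟩
      · rw [pvLoopA1, if_neg hstop]; exact h1
      · rw [pvLoopB1, if_pos (by rw [hfd]; omega)]; exact h2

-- ===== VERDICT (by name: the statement is the Claim_ definition above) =====
theorem solution_124_country_spec : Claim_equal_solution_124_country := by
  intro n _
  unfold Spec_solution_124_country solution_124_country solution_124_country_alt
  obtain ⟨k, b2, hk, hA, hB, hb2⟩ := pvLoops1_corr (n.toNat + 1) n 0 0 9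
    (by norm_num) (by norm_num) (by omega)
  simp only [hA, hB]
  have h31 : PySem.Int.floordiv ((3:Int) ^ (k + 1)) 3 = 3 ^ k := by
    rw [PySem.Int.floordiv_eq_ediv_of_pos (by omega : (0:Int) < 3)]
    rw [show (3:Int) ^ (k + 1) = 3 * 3 ^ k by ring, Int.mul_ediv_cancel_left _ (by norm_num)]
  have h32 : PySem.Int.floordiv ((3:Int) ^ k - 3) 2 = b2 := by
    rw [show (3:Int) ^ k - 3 = 2 * b2 by omega,
      PySem.Int.floordiv_eq_ediv_of_pos (by omega : (0:Int) < 2),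
      Int.mul_ediv_cancel_left _ (by norm_num)]
  rw [h31, h32]
  obtain ⟨l, rfl⟩ : ∃ l, k = l + 1 := ⟨k - 1, by omega⟩
  have hstr : pvLoopA2 n b2 (l + 1) "" = String.ofList ((pvLoopB2 (n - b2) (l + 1) ['4','1','2']).reverse) := by
    apply String.toList_inj.mp
    rw [pvLoopA2_chars, pvLoopB2_wrap]
    simp
  rw [hstr]
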